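-- pv_equiv track=rewrite | github.com/Dadudekc/Victor.os | src/dreamos/tools/manage_context.py | _count_tasks_by_planning_step
-- ===== SOURCE A (Python) =====
-- from typing import Dict, List, Optional, Tuple, Union
--
-- PLANNING_STEPS = {
--     1: "Strategic Planning",
--     2: "Feature Documentation",
--     3: "Design",
--     4: "Task Planning"
-- }
--
-- def _count_tasks_by_planning_step(episode_data: Dict) -> Dict[str, int]:
--     """Count tasks by planning step"""
--     counts = {step_name: 0 for _, step_name in PLANNING_STEPS.items()}
--
--     # Check if agent_assignments exists
--     if "agent_assignments" not in episode_data: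
--         return counts
--
--     # Count tasks by planning step
--     for agent_id, task in episode_data["agent_assignments"].items():
--         planning_step = task.get("planning_step")
--         if planning_step and planning_step in PLANNING_STEPS:
--             step_name = PLANNING_STEPS[planning_step]
--             counts[step_name] = counts.get(step_name, 0) + 1
--
--     return counts
-- ===== SOURCE B (Python) =====
-- PLANNING_STEPS = {
--     1: "Strategic Planning",
--     2: "Feature Documentation",
--     3: "Design",
--     4: "Task Planning"
-- }
--
-- def _count_tasks_by_planning_step(episode_data):
--     """Count tasks by planning step: one scan of the assignments per planning step."""
--     assignments = episode_data.get("agent_assignments", {})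
--     return {
--         name: sum(1 for task in assignments.values()
--                   if task.get("planning_step") == num)
--         for num, name in PLANNING_STEPS.items()
--     }
-- ===== Notes on version B (the rewrite author's own statement) =====
-- stated objective: alternative
-- what changed: A makes a single dispatching pass over the assignments updating a counts dict keyed by step name; B instead builds the result directly by iterating PLANNING_STEPS and counting, per step, the assignments whose planning_step equals that step number.
import Mathlib
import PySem

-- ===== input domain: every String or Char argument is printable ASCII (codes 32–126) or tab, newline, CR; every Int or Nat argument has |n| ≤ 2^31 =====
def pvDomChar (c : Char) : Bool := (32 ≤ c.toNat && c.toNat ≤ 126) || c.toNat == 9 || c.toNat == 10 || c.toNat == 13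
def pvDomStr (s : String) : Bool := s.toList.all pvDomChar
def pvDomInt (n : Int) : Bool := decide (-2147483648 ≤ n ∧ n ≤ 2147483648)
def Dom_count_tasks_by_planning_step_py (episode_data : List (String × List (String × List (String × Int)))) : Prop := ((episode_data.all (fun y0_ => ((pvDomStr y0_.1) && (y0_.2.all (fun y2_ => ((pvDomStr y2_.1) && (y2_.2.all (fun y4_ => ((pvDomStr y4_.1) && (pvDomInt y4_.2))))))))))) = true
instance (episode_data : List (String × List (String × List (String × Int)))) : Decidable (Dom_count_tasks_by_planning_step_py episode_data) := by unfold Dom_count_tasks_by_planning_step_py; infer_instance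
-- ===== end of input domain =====

-- B replaces A's single dispatching pass (a counts dict updated per assignment) with one
-- counting scan of the assignments per planning step (objective: alternative decomposition).

-- ===== PORT A =====
-- PLANNING_STEPS module constant
def pvPLANNING_STEPS : PySem.Dict Int String :=
  PySem.Dict.mk [(1, "Strategic Planning"), (2, "Feature Documentation"), (3, "Design"), (4, "Task Planning")]

-- the body of A's 'for agent_id, task in …' loop
def pvStepA (counts : PySem.Dict String Int) (item : String × List (String × Int)) : PySem.Dict String Int :=
  match (PySem.Dict.mk item.2).get? "planning_step" with   -- task.get("planning_step")
  | none => counts                                          -- falsy: None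
  | some p =>
    if p ≠ 0 ∧ pvPLANNING_STEPS.contains p = true then      -- 'planning_step and planning_step in PLANNING_STEPS'
      match pvPLANNING_STEPS.get? p with
      | some step_name => counts.insert step_name (counts.getD step_name 0 + 1)
      | none => counts
    else counts

def count_tasks_by_planning_step_py (episode_data : List (String × List (String × List (String × Int)))) : List (String × Int) :=
  let counts : PySem.Dict String Int :=
    pvPLANNING_STEPS.items.foldl (fun d p => d.insert p.2 0) PySem.Dict.empty   -- {step_name: 0 for …}
  let edd := PySem.Dict.mk episode_data
  if edd.contains "agent_assignments" = false then counts.items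
  else
    let asg := (edd.get? "agent_assignments").getD []       -- episode_data["agent_assignments"] (key present)
    (asg.foldl pvStepA counts).items

-- ===== PORT B =====
def count_tasks_by_planning_step_py_alt (episode_data : List (String × List (String × List (String × Int)))) : List (String × Int) :=
  let assignments := (PySem.Dict.mk episode_data).getD "agent_assignments" []
  pvPLANNING_STEPS.items.map (fun p =>
    (p.2, ((assignments.map Prod.snd).countP                -- sum(1 for task in assignments.values() if …)
      (fun task => (PySem.Dict.mk task).get? "planning_step" == some p.1) : Int)))

-- ===== PRECONDITION & SPEC =====
def Spec_count_tasks_by_planning_step_py (episode_data : List (String × List (String × List (String × Int)))) (out : List (String × Int)) : Prop := out = count_tasks_by_planning_step_py_alt episode_data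
instance (episode_data : List (String × List (String × List (String × Int)))) (out : List (String × Int)) : Decidable (Spec_count_tasks_by_planning_step_py episode_data out) := by unfold Spec_count_tasks_by_planning_step_py; infer_instance

-- ===== CLAIM (what is proved, stated in full; the proofs are below) =====
def Claim_equal_count_tasks_by_planning_step_py : Prop := ∀ (episode_data : List (String × List (String × List (String × Int)))), Dom_count_tasks_by_planning_step_py episode_data → Spec_count_tasks_by_planning_step_py episode_data (count_tasks_by_planning_step_py episode_data)

-- ===== LEMMAS AND PROOFS =====

-- number of assignments whose task has planning_step == n
def pvCnt (n : Int) (asg : List (String × List (String × Int))) : Int :=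
  (asg.countP (fun kv => (PySem.Dict.mk kv.2).get? "planning_step" == some n) : Int)

theorem pvLoop (asg : List (String × List (String × Int))) (a b c d : Int) :
    (asg.foldl pvStepA (PySem.Dict.mk [("Strategic Planning", a), ("Feature Documentation", b), ("Design", c), ("Task Planning", d)])).items
    = [("Strategic Planning", a + pvCnt 1 asg), ("Feature Documentation", b + pvCnt 2 asg),
       ("Design", c + pvCnt 3 asg), ("Task Planning", d + pvCnt 4 asg)] := by
  induction asg generalizing a b c d with
  | nil => simp [pvCnt]
  | cons t rest ih =>
    simp only [List.foldl_cons]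
    rcases hps : (PySem.Dict.mk t.2).get? "planning_step" with _ | p
    · have hstep : pvStepA (PySem.Dict.mk [("Strategic Planning", a), ("Feature Documentation", b), ("Design", c), ("Task Planning", d)]) t
          = PySem.Dict.mk [("Strategic Planning", a), ("Feature Documentation", b), ("Design", c), ("Task Planning", d)] := by
        unfold pvStepA; rw [hps]
      rw [hstep, ih]
      simp [pvCnt, hps]
    · by_cases h1 : p = 1
      · subst h1
        have hstep : pvStepA (PySem.Dict.mk [("Strategic Planning", a), ("Feature Documentation", b), ("Design", c), ("Task Planning", d)]) t
            = PySem.Dict.mk [("Strategic Planning", a + 1), ("Feature Documentation", b), ("Design", c), ("Task Planning", d)] := by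
          unfold pvStepA; rw [hps]
          rfl
        rw [hstep, ih]
        simp [pvCnt, hps]
        omega
      · by_cases h2 : p = 2
        · subst h2
          have hstep : pvStepA (PySem.Dict.mk [("Strategic Planning", a), ("Feature Documentation", b), ("Design", c), ("Task Planning", d)]) t
              = PySem.Dict.mk [("Strategic Planning", a), ("Feature Documentation", b + 1), ("Design", c), ("Task Planning", d)] := by
            unfold pvStepA; rw [hps]
            rfl
          rw [hstep, ih]
          simp [pvCnt, hps]
          omega
        · by_cases h3 : p = 3
          · subst h3
            have hstep : pvStepA (PySem.Dict.mk [("Strategic Planning", a), ("Feature Documentation", b), ("Design", c), ("Task Planning", d)]) t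
                = PySem.Dict.mk [("Strategic Planning", a), ("Feature Documentation", b), ("Design", c + 1), ("Task Planning", d)] := by
              unfold pvStepA; rw [hps]
              rfl
            rw [hstep, ih]
            simp [pvCnt, hps]
            omega
          · by_cases h4 : p = 4
            · subst h4
              have hstep : pvStepA (PySem.Dict.mk [("Strategic Planning", a), ("Feature Documentation", b), ("Design", c), ("Task Planning", d)]) t
                  = PySem.Dict.mk [("Strategic Planning", a), ("Feature Documentation", b), ("Design", c), ("Task Planning", d + 1)] := by
                unfold pvStepA; rw [hps]
                rfl
              rw [hstep, ih]
              simp [pvCnt, hps]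
              omega
            · have hstep : pvStepA (PySem.Dict.mk [("Strategic Planning", a), ("Feature Documentation", b), ("Design", c), ("Task Planning", d)]) t
                  = PySem.Dict.mk [("Strategic Planning", a), ("Feature Documentation", b), ("Design", c), ("Task Planning", d)] := by
                unfold pvStepA; rw [hps]
                have hc : (pvPLANNING_STEPS.contains p) = false := by
                  simp [pvPLANNING_STEPS, PySem.Dict.contains]
                  omega
                simp [hc]
              rw [hstep, ih]
              simp [pvCnt, hps, h1, h2, h3, h4]

-- ===== VERDICT (by name: the statement is the Claim_ definition above) =====
theorem count_tasks_by_planning_step_py_spec : Claim_equal_count_tasks_by_planning_step_py := by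
  intro episode_data _
  unfold Spec_count_tasks_by_planning_step_py
  unfold count_tasks_by_planning_step_py count_tasks_by_planning_step_py_alt
  rcases hg : (PySem.Dict.mk episode_data).get? "agent_assignments" with _ | asg
  · have hc : (PySem.Dict.mk episode_data).contains "agent_assignments" = false := by
      rw [PySem.Dict.contains_eq_isSome_get?, hg]; rfl
    simp only [hc, PySem.Dict.getD_eq_get?_getD, hg]
    rfl
  · have hc : (PySem.Dict.mk episode_data).contains "agent_assignments" = true := by
      rw [PySem.Dict.contains_eq_isSome_get?, hg]; rfl
    simp only [hc, PySem.Dict.getD_eq_get?_getD, hg, Option.getD_some, Bool.true_eq_false, if_false]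
    have h0 := pvLoop asg 0 0 0 0
    rw [show (List.foldl pvStepA (pvPLANNING_STEPS.items.foldl (fun d p => d.insert p.2 0) PySem.Dict.empty) asg).items
        = (List.foldl pvStepA (PySem.Dict.mk [("Strategic Planning", 0), ("Feature Documentation", 0), ("Design", 0), ("Task Planning", 0)]) asg).items from rfl, h0]
    simp [pvPLANNING_STEPS, pvCnt, List.countP_map, Function.comp_def]
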